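-- pv_equiv track=rewrite | github.com/dsgorthy/Form4 | api/trade_grade.py | _categorize_role
-- ===== SOURCE A (Python) =====
-- def _categorize_role(title: str | None) -> str:
--     """Categorize insider title into a role bucket."""
--     if not title:
--         return "other"
--     t = title.upper()
--     if "CEO" in t or "CHIEF EXECUTIVE" in t:
--         return "ceo"
--     if "CFO" in t or "CHIEF FINANCIAL" in t:
--         return "cfo"
--     if "VICE PRESIDENT" in t or "SVP" in t or "EVP" in t or (" VP" in t or t.startswith("VP")):
--         return "vp"
--     if "DIRECTOR" in t:
--         return "director"
--     if "COO" in t or "CTO" in t or "CHIEF TECH" in t or "CHIEF OPERATING" in t: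
--         return "csuite"
--     if "10%" in t or "TENPERCENT" in t:
--         return "10pct"
--     if "PRESIDENT" in t and not any(x in t for x in ["CEO", "CFO", "COO", "CTO", "CHIEF"]):
--         return "president"
--     return "other"
-- ===== SOURCE B (Python) =====
-- # Different algorithm: one positional scan of the (space-padded) title that keeps the
-- # best (lowest) rank of any keyword starting at each position, plus a blocker flag;
-- # the bucket is read off the best rank at the end (vs A's per-keyword substring cascade).
--
-- _KEYWORDS = [
--     ("CEO", 0), ("CHIEF EXECUTIVE", 0),
--     ("CFO", 1), ("CHIEF FINANCIAL", 1),
--     ("VICE PRESIDENT", 2), ("SVP", 2), ("EVP", 2), (" VP", 2),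
--     ("DIRECTOR", 3),
--     ("COO", 4), ("CTO", 4), ("CHIEF TECH", 4), ("CHIEF OPERATING", 4),
--     ("10%", 5), ("TENPERCENT", 5),
--     ("PRESIDENT", 6),
-- ]
-- _BLOCKERS = ["CEO", "CFO", "COO", "CTO", "CHIEF"]
-- _BUCKETS = ["ceo", "cfo", "vp", "director", "csuite", "10pct", "president"]
--
--
-- def _categorize_role(title):
--     """Categorize insider title into a role bucket."""
--     if not title:
--         return "other"
--     padded = " " + title.upper()  # the pad makes position 0 cover the VP-prefix rule
--     best = 7
--     blocked = False
--     for i in range(len(padded)):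
--         for kw, rank in _KEYWORDS:
--             if padded.startswith(kw, i) and rank < best:
--                 best = rank
--         for b in _BLOCKERS:
--             if padded.startswith(b, i):
--                 blocked = True
--     if best == 7:
--         return "other"
--     if best == 6 and blocked:
--         return "other"
--     return _BUCKETS[best]
-- ===== Notes on version B (the rewrite author's own statement) =====
-- stated objective: alternative
-- what changed: Replaced A's per-keyword substring cascade with a single positional scan of the space-padded title that keeps the minimum rank of any keyword starting at each position (plus a blocker flag) and reads the bucket off the best rank at the end; the leading-space pad folds the VP-prefix special case into a plain keyword.
import Mathlib
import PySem

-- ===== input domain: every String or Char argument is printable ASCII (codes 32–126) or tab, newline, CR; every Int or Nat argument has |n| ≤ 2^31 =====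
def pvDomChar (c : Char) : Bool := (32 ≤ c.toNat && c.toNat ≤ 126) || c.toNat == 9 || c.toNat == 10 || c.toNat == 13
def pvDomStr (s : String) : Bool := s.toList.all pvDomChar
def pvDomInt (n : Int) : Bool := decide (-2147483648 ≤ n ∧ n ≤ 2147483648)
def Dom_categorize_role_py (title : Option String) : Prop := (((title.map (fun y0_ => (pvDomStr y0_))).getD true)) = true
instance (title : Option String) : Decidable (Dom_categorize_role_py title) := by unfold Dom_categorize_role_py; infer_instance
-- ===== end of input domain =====

-- B replaces A's per-keyword substring cascade by ONE positional scan of the space-padded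
-- title keeping the minimum keyword rank seen (plus a blocker flag); objective: alternative.

-- ===== PORT A =====
def categorize_role_py (title : Option String) : String :=
  match title with
  | none => "other"
  | some s =>
    if s = "" then "other"
    else
      let t := PySem.Str.upper s
      if PySem.Str.isIn "CEO" t || PySem.Str.isIn "CHIEF EXECUTIVE" t then "ceo"
      else if PySem.Str.isIn "CFO" t || PySem.Str.isIn "CHIEF FINANCIAL" t then "cfo"
      else if PySem.Str.isIn "VICE PRESIDENT" t || PySem.Str.isIn "SVP" t || PySem.Str.isIn "EVP" t
              || (PySem.Str.isIn " VP" t || PySem.Str.startswith t "VP") then "vp"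
      else if PySem.Str.isIn "DIRECTOR" t then "director"
      else if PySem.Str.isIn "COO" t || PySem.Str.isIn "CTO" t || PySem.Str.isIn "CHIEF TECH" t
              || PySem.Str.isIn "CHIEF OPERATING" t then "csuite"
      else if PySem.Str.isIn "10%" t || PySem.Str.isIn "TENPERCENT" t then "10pct"
      else if PySem.Str.isIn "PRESIDENT" t
              && !(["CEO", "CFO", "COO", "CTO", "CHIEF"].any (fun x => PySem.Str.isIn x t)) then "president"
      else "other"

-- ===== PORT B =====
-- _KEYWORDS: (keyword, rank) pairs; rank = bucket priority
def pvKws : List (List Char × Nat) :=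
  [(['C','E','O'], 0), (['C','H','I','E','F',' ','E','X','E','C','U','T','I','V','E'], 0),
   (['C','F','O'], 1), (['C','H','I','E','F',' ','F','I','N','A','N','C','I','A','L'], 1),
   (['V','I','C','E',' ','P','R','E','S','I','D','E','N','T'], 2), (['S','V','P'], 2),
   (['E','V','P'], 2), ([' ','V','P'], 2),
   (['D','I','R','E','C','T','O','R'], 3),
   (['C','O','O'], 4), (['C','T','O'], 4), (['C','H','I','E','F',' ','T','E','C','H'], 4),
   (['C','H','I','E','F',' ','O','P','E','R','A','T','I','N','G'], 4),
   (['1','0','%'], 5), (['T','E','N','P','E','R','C','E','N','T'], 5),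
   (['P','R','E','S','I','D','E','N','T'], 6)]

def pvBlk : List (List Char) :=
  [['C','E','O'], ['C','F','O'], ['C','O','O'], ['C','T','O'], ['C','H','I','E','F']]

def pvBuckets : List String := ["ceo", "cfo", "vp", "director", "csuite", "10pct", "president"]

-- Source B's 'for i in range(len(padded))' loop: handle the current position, recurse on the rest
def pvScanFrom (st : Nat × Bool) : List Char → Nat × Bool
  | [] => st
  | c :: rest =>
    let best := pvKws.foldl
      (fun b kr => if PySem.Chars.startswith (c :: rest) kr.1 && decide (kr.2 < b) then kr.2 else b) st.1
    let blocked := pvBlk.foldl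
      (fun bl k => if PySem.Chars.startswith (c :: rest) k then true else bl) st.2
    pvScanFrom (best, blocked) rest

def categorize_role_py_alt (title : Option String) : String :=
  match title with
  | none => "other"
  | some s =>
    if s = "" then "other"
    else
      let padded := ' ' :: PySem.Chars.upper s.toList   -- the space pad, as in Source B
      let res := pvScanFrom (7, false) padded
      if res.1 = 7 then "other"
      else if res.1 = 6 && res.2 then "other"
      else (PySem.List.pyGet? pvBuckets (res.1 : Int)).getD ""  -- index proven < 7 by the guards; default unreachable

-- ===== PRECONDITION & SPEC =====
def Spec_categorize_role_py (title : Option String) (out : String) : Prop := out = categorize_role_py_alt title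
instance (title : Option String) (out : String) : Decidable (Spec_categorize_role_py title out) := by unfold Spec_categorize_role_py; infer_instance

-- ===== CLAIM (what is proved, stated in full; the proofs are below) =====
def Claim_equal_categorize_role_py : Prop := ∀ (title : Option String), Dom_categorize_role_py title → Spec_categorize_role_py title (categorize_role_py title)

-- ===== LEMMAS AND PROOFS =====

-- proof-side characterisations of the scan's two components
def pvBestIn (l : List Char) : Nat :=
  pvKws.foldl (fun b kr => if PySem.Chars.isIn kr.1 l && decide (kr.2 < b) then kr.2 else b) 7

def pvBlkIn (l : List Char) : Bool := pvBlk.any (fun k => PySem.Chars.isIn k l)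

-- a substring occurs in c::l iff it starts there or occurs in l
theorem pv_isIn_cons (k : List Char) (c : Char) (l : List Char) :
    PySem.Chars.isIn k (c :: l)
      = (PySem.Chars.startswith (c :: l) k || PySem.Chars.isIn k l) := by
  rw [Bool.eq_iff_iff, Bool.or_eq_true, PySem.Chars.isIn_iff_infix, PySem.Chars.isIn_iff_infix,
    PySem.Chars.startswith_iff, List.infix_cons_iff]

-- the min-fold only decreases its accumulator
theorem pv_fold_le {α : Type} (P : α × Nat → Bool) :
    ∀ (kws : List (α × Nat)) (b : Nat),
      List.foldl (fun b kr => if P kr && decide (kr.2 < b) then kr.2 else b) b kws ≤ b := by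
  intro kws
  induction kws with
  | nil => intro b; simp
  | cons kr rest ih =>
    intro b
    simp only [List.foldl_cons]
    refine le_trans (ih _) ?_
    split_ifs with h
    · simp only [Bool.and_eq_true, decide_eq_true_eq] at h
      exact le_of_lt h.2
    · exact le_rfl

-- the min-fold from any start b ≤ 7 is min b (fold from 7)
theorem pv_fold_min {α : Type} (P : α × Nat → Bool) :
    ∀ (kws : List (α × Nat)) (b : Nat), b ≤ 7 →
      List.foldl (fun b kr => if P kr && decide (kr.2 < b) then kr.2 else b) b kws
        = min b (List.foldl (fun b kr => if P kr && decide (kr.2 < b) then kr.2 else b) 7 kws) := by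
  intro kws
  induction kws with
  | nil => intro b hb; simp; omega
  | cons kr rest ih =>
    intro b hb
    have hb1 : (if P kr && decide (kr.2 < b) then kr.2 else b) ≤ 7 := by split_ifs with h  <;>
      (simp only [Bool.and_eq_true, decide_eq_true_eq] at h; omega)
    have hb2 : (if P kr && decide (kr.2 < 7) then kr.2 else 7) ≤ 7 := by split_ifs with h  <;>
      (simp only [Bool.and_eq_true, decide_eq_true_eq] at h; omega)
    have hF : List.foldl (fun b kr => if P kr && decide (kr.2 < b) then kr.2 else b) 7 rest ≤ 7 :=
      pv_fold_le P rest 7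
    simp only [List.foldl_cons]
    rw [ih _ hb1, ih _ hb2]
    generalize List.foldl (fun b kr => if P kr && decide (kr.2 < b) then kr.2 else b) 7 rest = F at hF ⊢
    cases hP : P kr <;> simp only [Bool.true_and, Bool.false_and] <;> split_ifs <;> simp_all <;> omega

-- or-fold over the blockers
theorem pv_fold_or (P : List Char → Bool) :
    ∀ (ks : List (List Char)) (bl : Bool),
      List.foldl (fun bl k => if P k then true else bl) bl ks = (bl || ks.any P) := by
  intro ks
  induction ks with
  | nil => intro bl; simp
  | cons k rest ih =>
    intro bl
    simp only [List.foldl_cons, List.any_cons]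
    rw [ih]
    cases hP : P k <;> cases bl <;> simp

-- splitting the min-fold over a disjunction of predicates
theorem pv_fold_split {α : Type} (Q R : α × Nat → Bool) :
    ∀ (kws : List (α × Nat)),
      List.foldl (fun b kr => if (Q kr || R kr) && decide (kr.2 < b) then kr.2 else b) 7 kws
        = min (List.foldl (fun b kr => if Q kr && decide (kr.2 < b) then kr.2 else b) 7 kws)
              (List.foldl (fun b kr => if R kr && decide (kr.2 < b) then kr.2 else b) 7 kws) := by
  intro kws
  induction kws with
  | nil => simp
  | cons kr rest ih =>
    have hb1 : (if (Q kr || R kr) && decide (kr.2 < 7) then kr.2 else 7) ≤ 7 := by split_ifs with h  <;>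
      (simp only [Bool.and_eq_true, decide_eq_true_eq] at h; omega)
    have hb2 : (if Q kr && decide (kr.2 < 7) then kr.2 else 7) ≤ 7 := by split_ifs with h  <;>
      (simp only [Bool.and_eq_true, decide_eq_true_eq] at h; omega)
    have hb3 : (if R kr && decide (kr.2 < 7) then kr.2 else 7) ≤ 7 := by split_ifs with h  <;>
      (simp only [Bool.and_eq_true, decide_eq_true_eq] at h; omega)
    have hFQ : List.foldl (fun b kr => if Q kr && decide (kr.2 < b) then kr.2 else b) 7 rest ≤ 7 :=
      pv_fold_le Q rest 7
    have hFR : List.foldl (fun b kr => if R kr && decide (kr.2 < b) then kr.2 else b) 7 rest ≤ 7 :=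
      pv_fold_le R rest 7
    simp only [List.foldl_cons]
    rw [pv_fold_min (fun kr => Q kr || R kr) rest _ hb1,
        pv_fold_min Q rest _ hb2, pv_fold_min R rest _ hb3, ih]
    generalize List.foldl (fun b kr => if Q kr && decide (kr.2 < b) then kr.2 else b) 7 rest = FQ at hFQ ⊢
    generalize List.foldl (fun b kr => if R kr && decide (kr.2 < b) then kr.2 else b) 7 rest = FR at hFR ⊢
    cases hq : Q kr <;> cases hrr : R kr <;>
      simp only [Bool.true_and, Bool.false_and, Bool.true_or, Bool.false_or, Bool.or_false] <;>
      split_ifs <;> simp_all <;> omega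

-- pvBestIn over a cons splits into the position-0 fold and pvBestIn of the tail
theorem pv_bestIn_cons (c : Char) (l : List Char) :
    pvBestIn (c :: l)
      = min (pvKws.foldl (fun b kr =>
              if PySem.Chars.startswith (c :: l) kr.1 && decide (kr.2 < b) then kr.2 else b) 7)
            (pvBestIn l) := by
  unfold pvBestIn
  have := pv_fold_split (fun kr => PySem.Chars.startswith (c :: l) kr.1)
    (fun kr => PySem.Chars.isIn kr.1 l) pvKws
  simp only [pv_isIn_cons]
  exact this

theorem pv_blkIn_cons (c : Char) (l : List Char) :
    pvBlkIn (c :: l) = (pvBlk.any (fun k => PySem.Chars.startswith (c :: l) k) || pvBlkIn l) := by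
  unfold pvBlkIn
  simp only [pv_isIn_cons]
  induction pvBlk with
  | nil => simp
  | cons k rest ih =>
    simp only [List.any_cons, ih]
    cases PySem.Chars.startswith (c :: l) k <;> cases PySem.Chars.isIn k l <;> simp

-- the scan computes (min b (pvBestIn l), bl || pvBlkIn l)
theorem pv_scan_spec : ∀ (l : List Char) (b : Nat) (bl : Bool), b ≤ 7 →
    pvScanFrom (b, bl) l = (min b (pvBestIn l), bl || pvBlkIn l) := by
  intro l
  induction l with
  | nil =>
    intro b bl hb
    have h1 : pvBestIn [] = 7 := by decide
    have h2 : pvBlkIn [] = false := by decide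
    have h3 : min b 7 = b := by omega
    simp [pvScanFrom, h1, h2, h3]
  | cons c rest ih =>
    intro b bl hb
    simp only [pvScanFrom]
    set pos := pvKws.foldl
      (fun b kr => if PySem.Chars.startswith (c :: rest) kr.1 && decide (kr.2 < b) then kr.2 else b) b with hpos
    have hposle : pos ≤ b := pv_fold_le _ pvKws b
    rw [ih _ _ (le_trans hposle hb)]
    rw [pv_fold_or]
    have hpmin : pos = min b (pvKws.foldl
        (fun b kr => if PySem.Chars.startswith (c :: rest) kr.1 && decide (kr.2 < b) then kr.2 else b) 7) :=
      pv_fold_min _ pvKws b hb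
    rw [pv_bestIn_cons, pv_blkIn_cons]
    simp only [Prod.mk.injEq]
    refine ⟨by rw [hpmin, min_assoc], ?_⟩
    cases bl <;> cases pvBlk.any (fun k => PySem.Chars.startswith (c :: rest) k) <;>
      cases pvBlkIn rest <;> simp

-- peeling one keyword off the min-fold started at 7
theorem pv_fold7_cons {α : Type} (P : α × Nat → Bool) (x : α × Nat) (rest : List (α × Nat)) :
    List.foldl (fun b kr => if P kr && decide (kr.2 < b) then kr.2 else b) 7 (x :: rest)
      = min (if P x then min x.2 7 else 7)
            (List.foldl (fun b kr => if P kr && decide (kr.2 < b) then kr.2 else b) 7 rest) := by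
  have hb0 : (if P x && decide (x.2 < 7) then x.2 else 7) ≤ 7 := by split_ifs with h <;>
    (simp only [Bool.and_eq_true, decide_eq_true_eq] at h; omega)
  simp only [List.foldl_cons]
  rw [pv_fold_min P rest _ hb0]
  congr 1
  cases hP : P x <;> simp only [Bool.true_and, Bool.false_and] <;> split_ifs <;> simp_all

-- merging two same-rank keywords of the min-chain into one disjunction
theorem pv_min_group (a b : Bool) (r X : Nat) (hr : r ≤ 7) :
    min (if a then r else 7) (min (if b then r else 7) X) = min (if a || b then r else 7) X := by
  cases a <;> cases b <;> simp <;> omega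

-- pvBestIn as a cascade over the 16 isIn flags
theorem pv_bestIn_cascade (l : List Char) :
    pvBestIn l
      = (if PySem.Chars.isIn ['C','E','O'] l || PySem.Chars.isIn ['C','H','I','E','F',' ','E','X','E','C','U','T','I','V','E'] l then 0
         else if PySem.Chars.isIn ['C','F','O'] l || PySem.Chars.isIn ['C','H','I','E','F',' ','F','I','N','A','N','C','I','A','L'] l then 1
         else if PySem.Chars.isIn ['V','I','C','E',' ','P','R','E','S','I','D','E','N','T'] l || PySem.Chars.isIn ['S','V','P'] l
                 || PySem.Chars.isIn ['E','V','P'] l || PySem.Chars.isIn [' ','V','P'] l then 2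
         else if PySem.Chars.isIn ['D','I','R','E','C','T','O','R'] l then 3
         else if PySem.Chars.isIn ['C','O','O'] l || PySem.Chars.isIn ['C','T','O'] l
                 || PySem.Chars.isIn ['C','H','I','E','F',' ','T','E','C','H'] l
                 || PySem.Chars.isIn ['C','H','I','E','F',' ','O','P','E','R','A','T','I','N','G'] l then 4
         else if PySem.Chars.isIn ['1','0','%'] l || PySem.Chars.isIn ['T','E','N','P','E','R','C','E','N','T'] l then 5
         else if PySem.Chars.isIn ['P','R','E','S','I','D','E','N','T'] l then 6 else 7) := by
  unfold pvBestIn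
  simp only [pvKws]
  rw [pv_fold7_cons, pv_fold7_cons, pv_fold7_cons, pv_fold7_cons, pv_fold7_cons, pv_fold7_cons,
      pv_fold7_cons, pv_fold7_cons, pv_fold7_cons, pv_fold7_cons, pv_fold7_cons, pv_fold7_cons,
      pv_fold7_cons, pv_fold7_cons, pv_fold7_cons, pv_fold7_cons, List.foldl_nil]
  simp only [show min 0 7 = 0 from rfl, show min 1 7 = 1 from rfl, show min 2 7 = 2 from rfl,
      show min 3 7 = 3 from rfl, show min 4 7 = 4 from rfl, show min 5 7 = 5 from rfl,
      show min 6 7 = 6 from rfl]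
  rw [pv_min_group _ _ 0 _ (by omega), pv_min_group _ _ 1 _ (by omega),
      pv_min_group _ _ 2 _ (by omega), pv_min_group _ _ 2 _ (by omega),
      pv_min_group _ _ 2 _ (by omega), pv_min_group _ _ 4 _ (by omega),
      pv_min_group _ _ 4 _ (by omega), pv_min_group _ _ 4 _ (by omega),
      pv_min_group _ _ 5 _ (by omega)]
  generalize (PySem.Chars.isIn ['C','E','O'] l || PySem.Chars.isIn ['C','H','I','E','F',' ','E','X','E','C','U','T','I','V','E'] l) = g0
  generalize (PySem.Chars.isIn ['C','F','O'] l || PySem.Chars.isIn ['C','H','I','E','F',' ','F','I','N','A','N','C','I','A','L'] l) = g1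
  generalize (PySem.Chars.isIn ['V','I','C','E',' ','P','R','E','S','I','D','E','N','T'] l || PySem.Chars.isIn ['S','V','P'] l
      || PySem.Chars.isIn ['E','V','P'] l || PySem.Chars.isIn [' ','V','P'] l) = g2
  generalize (PySem.Chars.isIn ['D','I','R','E','C','T','O','R'] l) = g3
  generalize (PySem.Chars.isIn ['C','O','O'] l || PySem.Chars.isIn ['C','T','O'] l
      || PySem.Chars.isIn ['C','H','I','E','F',' ','T','E','C','H'] l
      || PySem.Chars.isIn ['C','H','I','E','F',' ','O','P','E','R','A','T','I','N','G'] l) = g4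
  generalize (PySem.Chars.isIn ['1','0','%'] l || PySem.Chars.isIn ['T','E','N','P','E','R','C','E','N','T'] l) = g5
  generalize (PySem.Chars.isIn ['P','R','E','S','I','D','E','N','T'] l) = g6
  cases g0 <;> cases g1 <;> cases g2 <;> cases g3 <;> cases g4 <;> cases g5 <;> cases g6 <;> decide

-- a substring whose first char is not ' ' occurs in ' '::t iff it occurs in t
theorem pv_isIn_cons_ne (c : Char) (h : c ≠ ' ') (k t : List Char) :
    PySem.Chars.isIn (c :: k) (' ' :: t) = PySem.Chars.isIn (c :: k) t := by
  rw [Bool.eq_iff_iff, PySem.Chars.isIn_iff_infix, PySem.Chars.isIn_iff_infix,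
    List.infix_cons_iff]
  constructor
  · rintro (hp | hi)
    · exact absurd (List.cons_prefix_cons.mp hp).1 h
    · exact hi
  · intro hi
    exact Or.inr hi

-- padding with a space: ' '::k occurs in ' '::t iff it occurs in t or t starts with k
theorem pv_isIn_space_cons (k t : List Char) :
    PySem.Chars.isIn (' ' :: k) (' ' :: t)
      = (PySem.Chars.isIn (' ' :: k) t || PySem.Chars.startswith t k) := by
  rw [Bool.eq_iff_iff, Bool.or_eq_true, PySem.Chars.isIn_iff_infix,
    PySem.Chars.isIn_iff_infix, PySem.Chars.startswith_iff, List.infix_cons_iff,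
    List.cons_prefix_cons]
  constructor
  · rintro (⟨-, hp⟩ | hi)
    · exact Or.inr hp
    · exact Or.inl hi
  · rintro (hi | hp)
    · exact Or.inr hi
    · exact Or.inl ⟨rfl, hp⟩

-- ===== VERDICT =====
theorem categorize_role_py_spec : Claim_equal_categorize_role_py := by
  intro title _
  unfold Spec_categorize_role_py categorize_role_py categorize_role_py_alt
  cases title with
  | none => rfl
  | some s =>
    by_cases hs : s = ""
    · simp [hs]
    · simp only [hs, if_false]
      rw [pv_scan_spec _ 7 false (le_refl 7)]
      have hle : pvBestIn (' ' :: PySem.Chars.upper s.toList) ≤ 7 := pv_fold_le _ pvKws 7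
      rw [show min 7 (pvBestIn (' ' :: PySem.Chars.upper s.toList))
            = pvBestIn (' ' :: PySem.Chars.upper s.toList) from by omega]
      rw [pv_bestIn_cascade]
      simp only [PySem.Str.isIn_eq, PySem.Str.startswith_eq, PySem.Str.toList_upper]
      generalize PySem.Chars.upper s.toList = t
      simp only [show ("CEO" : String).toList = ['C','E','O'] from rfl,
          show ("CHIEF EXECUTIVE" : String).toList = ['C','H','I','E','F',' ','E','X','E','C','U','T','I','V','E'] from rfl,
          show ("CFO" : String).toList = ['C','F','O'] from rfl,
          show ("CHIEF FINANCIAL" : String).toList = ['C','H','I','E','F',' ','F','I','N','A','N','C','I','A','L'] from rfl,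
          show ("VICE PRESIDENT" : String).toList = ['V','I','C','E',' ','P','R','E','S','I','D','E','N','T'] from rfl,
          show ("SVP" : String).toList = ['S','V','P'] from rfl,
          show ("EVP" : String).toList = ['E','V','P'] from rfl,
          show (" VP" : String).toList = [' ','V','P'] from rfl,
          show ("VP" : String).toList = ['V','P'] from rfl,
          show ("DIRECTOR" : String).toList = ['D','I','R','E','C','T','O','R'] from rfl,
          show ("COO" : String).toList = ['C','O','O'] from rfl,
          show ("CTO" : String).toList = ['C','T','O'] from rfl,
          show ("CHIEF TECH" : String).toList = ['C','H','I','E','F',' ','T','E','C','H'] from rfl,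
          show ("CHIEF OPERATING" : String).toList = ['C','H','I','E','F',' ','O','P','E','R','A','T','I','N','G'] from rfl,
          show ("10%" : String).toList = ['1','0','%'] from rfl,
          show ("TENPERCENT" : String).toList = ['T','E','N','P','E','R','C','E','N','T'] from rfl]
      simp only [pvBlkIn, pvBlk, List.any_cons, List.any_nil,
          pv_isIn_cons_ne 'C' (by decide), pv_isIn_cons_ne 'V' (by decide),
          pv_isIn_cons_ne 'S' (by decide), pv_isIn_cons_ne 'E' (by decide),
          pv_isIn_space_cons, pv_isIn_cons_ne 'D' (by decide),
          pv_isIn_cons_ne '1' (by decide), pv_isIn_cons_ne 'T' (by decide),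
          pv_isIn_cons_ne 'P' (by decide), Bool.or_assoc, Bool.or_false]
      split_ifs <;> simp_all <;> rfl
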